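-- pv_equiv track=rewrite | github.com/joonyi/Leetcode | 672BulbSwitchII.py | flipLights3
-- ===== SOURCE A (Python) =====
-- def flipLights3(n, m):
--     import itertools
--     seen = set()
--     for cand in itertools.product((0, 1), repeat=4):
--         if sum(cand) % 2 == m % 2 and sum(cand) <= m:
--             A = []
--             for i in range(min(n, 3)):
--                 light = 1
--                 light ^= cand[0]
--                 light ^= cand[1] and i % 2
--                 light ^= cand[2] and i % 2 == 0
--                 light ^= cand[3] and i % 3 == 0
--                 A.append(light)
--             seen.add(tuple(A))
--
--     return len(seen)
-- ===== SOURCE B (Python) =====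
-- def flipLights3(n, m):
--     # Closed-form solution for Bulb Switcher II: only the first min(n, 3)
--     # bulbs matter, and only up to 3 presses produce new states.
--     k = min(n, 3)
--     if k == 0 or m == 0:
--         return 1
--     if k == 1:
--         return 2
--     if k == 2:
--         return 3 if m == 1 else 4
--     return 4 if m == 1 else 7 if m == 2 else 8
-- ===== Notes on version B (the rewrite author's own statement) =====
-- stated objective: simpler
-- what changed: Replaced the enumeration of all 16 press-combinations with per-bulb XOR simulation by the closed-form case analysis on min(n,3) and m; Pre_ restricts to the natural domain n >= 0, m >= 0 because negative bulb or press counts are meaningless and A's values there (1 for n < 0, 0 for m < 0) are accidents of the enumeration.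
-- outside the precondition, e.g. on flipLights3(-1, 2): A returns 1, B returns 7; on flipLights3(2, -1): A returns 0, B returns 4
import Mathlib
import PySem

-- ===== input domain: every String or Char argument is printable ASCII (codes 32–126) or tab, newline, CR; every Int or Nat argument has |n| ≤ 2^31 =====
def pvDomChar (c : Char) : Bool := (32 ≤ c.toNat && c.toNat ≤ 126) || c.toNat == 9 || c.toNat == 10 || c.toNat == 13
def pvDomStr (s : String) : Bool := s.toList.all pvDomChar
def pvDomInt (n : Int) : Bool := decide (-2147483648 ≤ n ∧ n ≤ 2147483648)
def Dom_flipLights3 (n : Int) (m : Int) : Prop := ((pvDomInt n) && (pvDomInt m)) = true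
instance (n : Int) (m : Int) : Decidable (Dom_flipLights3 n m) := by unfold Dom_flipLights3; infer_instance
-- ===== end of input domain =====

-- B replaces A's enumeration of all 16 press-combinations by the closed-form
-- case analysis on min(n,3) and m; objective: simpler.

-- ===== PORT A =====
-- xor of two ints that are each 0 or 1 (exact for the 0/1 values A's loop produces)
def pvXor (a b : Int) : Int := if a = b then 0 else 1

-- itertools.product((0, 1), repeat=4), in itertools order (last component fastest)
def pvCands : List (Int × Int × Int × Int) :=
  ([0, 1] : List Int).flatMap (fun a =>
    ([0, 1] : List Int).flatMap (fun b =>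
      ([0, 1] : List Int).flatMap (fun c =>
        ([0, 1] : List Int).map (fun d => (a, b, c, d)))))

-- the inner 'for i in range(min(n,3))' loop building list A
def pvBody (n : Int) (cand : Int × Int × Int × Int) : List Int :=
  (PySem.List.pyRange 0 (min n 3) 1).foldl (fun A i =>
    let light : Int := 1
    let light := pvXor light cand.1
    -- 'cand[1] and i % 2' : 0 if cand[1] falsy, else i % 2
    let light := pvXor light (if cand.2.1 = 0 then 0 else PySem.Int.mod i 2)
    -- 'cand[2] and i % 2 == 0' : 0 if cand[2] falsy, else the bool as 0/1
    let light := pvXor light (if cand.2.2.1 = 0 then 0 else (if PySem.Int.mod i 2 = 0 then 1 else 0))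
    let light := pvXor light (if cand.2.2.2 = 0 then 0 else (if PySem.Int.mod i 3 = 0 then 1 else 0))
    A ++ [light]) []

-- one iteration of the outer loop over cands
def pvStep (n m : Int) (seen : PySem.Set (List Int)) (cand : Int × Int × Int × Int) :
    PySem.Set (List Int) :=
  let s := cand.1 + cand.2.1 + cand.2.2.1 + cand.2.2.2
  if PySem.Int.mod s 2 = PySem.Int.mod m 2 ∧ s ≤ m then
    PySem.Set.add seen (pvBody n cand)
  else seen

def flipLights3 (n : Int) (m : Int) : Int :=
  (PySem.Set.len (pvCands.foldl (pvStep n m) PySem.Set.empty) : Int)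

-- ===== PORT B =====
def flipLights3_alt (n : Int) (m : Int) : Int :=
  let k := min n 3
  if k = 0 ∨ m = 0 then 1
  else if k = 1 then 2
  else if k = 2 then (if m = 1 then 3 else 4)
  else if m = 1 then 4 else if m = 2 then 7 else 8

-- ===== PRECONDITION & SPEC =====
-- Pre_ restricts to the natural domain n ≥ 0, m ≥ 0: negative bulb or press
-- counts are meaningless, and A's values there (1 for n < 0, 0 for m < 0) are
-- accidents of its enumeration.
def Pre_flipLights3 (n : Int) (m : Int) : Prop := 0 ≤ n ∧ 0 ≤ m
instance (n : Int) (m : Int) : Decidable (Pre_flipLights3 n m) := by unfold Pre_flipLights3; infer_instance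
def pvWitness_flipLights3 : Int × Int := (3, 2)

def Spec_flipLights3 (n : Int) (m : Int) (out : Int) : Prop := out = flipLights3_alt n m
instance (n : Int) (m : Int) (out : Int) : Decidable (Spec_flipLights3 n m out) := by unfold Spec_flipLights3; infer_instance

-- ===== CLAIM (what is proved, stated in full; the proofs are below) =====
def Claim_equal_flipLights3 : Prop := ∀ (n : Int) (m : Int), Dom_flipLights3 n m → Pre_flipLights3 n m → Spec_flipLights3 n m (flipLights3 n m)

-- ===== LEMMAS AND PROOFS =====

-- canonical representatives: on n ≥ 0, m ≥ 0 both functions depend on n only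
-- through min n 3 and on m only through zero-ness, parity and min with small bounds
def pvPinchN (n : Int) : Int := min (max n 0) 3
def pvPinchM (m : Int) : Int := if m < 0 then -1 else min m (4 + PySem.Int.mod m 2)

theorem pvBody_pinch (n : Int) (cand : Int × Int × Int × Int) :
    pvBody n cand = pvBody (pvPinchN n) cand := by
  unfold pvBody pvPinchN
  by_cases h : n ≤ 0
  · rw [PySem.List.pyRange_one_eq_nil (by omega), PySem.List.pyRange_one_eq_nil (by omega)]
  · have : min (min (max n 0) 3) 3 = min n 3 := by omega
    rw [this]

theorem pvCond_pinch (s m : Int) (hs0 : 0 ≤ s) (hs4 : s ≤ 4) :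
    (PySem.Int.mod s 2 = PySem.Int.mod m 2 ∧ s ≤ m) ↔
    (PySem.Int.mod s 2 = PySem.Int.mod (pvPinchM m) 2 ∧ s ≤ pvPinchM m) := by
  unfold pvPinchM
  simp only [PySem.Int.mod_eq_emod_of_pos (b := 2) (by norm_num)]
  split_ifs with h <;> omega

theorem pvStep_pinch (n m : Int) (seen : PySem.Set (List Int))
    (cand : Int × Int × Int × Int) (hc : cand ∈ pvCands) :
    pvStep n m seen cand = pvStep (pvPinchN n) (pvPinchM m) seen cand := by
  fin_cases hc <;>
    · unfold pvStep
      rw [pvBody_pinch]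
      exact if_congr (pvCond_pinch _ _ (by norm_num) (by norm_num)) rfl rfl

theorem flipLights3_pinch (n m : Int) :
    flipLights3 n m = flipLights3 (pvPinchN n) (pvPinchM m) := by
  unfold flipLights3
  congr 1
  exact PySem.List.foldl_congr_mem pvCands _ _ _ (fun seen cand hc => pvStep_pinch n m seen cand hc)

set_option maxHeartbeats 2000000 in
theorem flipLights3_alt_pinch (n m : Int) (hn : 0 ≤ n) (hm : 0 ≤ m) :
    flipLights3_alt n m = flipLights3_alt (pvPinchN n) (pvPinchM m) := by
  simp only [flipLights3_alt, pvPinchN, pvPinchM,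
    PySem.Int.mod_eq_emod_of_pos (b := 2) (by norm_num)]
  split_ifs <;> omega

theorem pvGrid (a b : Int) (ha0 : 0 ≤ a) (ha3 : a ≤ 3) (hb0 : 0 ≤ b) (hb5 : b ≤ 5) :
    flipLights3 a b = flipLights3_alt a b := by
  interval_cases a <;> interval_cases b <;> decide

-- ===== VERDICT (by name: the statement is the Claim_ definition above) =====
theorem flipLights3_spec : Claim_equal_flipLights3 := by
  intro n m _ hpre
  obtain ⟨hn, hm⟩ := hpre
  show flipLights3 n m = flipLights3_alt n m
  rw [flipLights3_pinch, flipLights3_alt_pinch n m hn hm]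
  apply pvGrid <;>
    simp only [pvPinchN, pvPinchM, PySem.Int.mod_eq_emod_of_pos (b := 2) (by norm_num)] <;>
    (try split_ifs) <;> omega
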